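-- pv_equiv track=rewrite | github.com/yixiatre21/ergasies_python | εργασία_1.py | counterRow
-- ===== SOURCE A (Python) =====
-- def counterRow(square):
--     rows = 0
--
--     for row in square:
--         count = 0
--         for cube in row:
--             if cube == 1:
--                 count += 1
--             else:
--                 count = 0
--
--             if  count >= 4:
--                 rows += 1
--
--     return rows
-- ===== SOURCE B (Python) =====
-- from itertools import groupby
--
-- def counterRow(square):
--     total = 0
--     for row in square:
--         for is_one, grp in groupby(row, key=lambda cube: cube == 1):
--             if is_one:
--                 total += max(0, sum(1 for _ in grp) - 3)
--     return total
-- ===== Notes on version B (the rewrite author's own statement) =====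
-- stated objective: alternative
-- what changed: Replaces the per-cell sliding counter-with-reset by grouping each row into maximal runs of consecutive 1s and adding the closed form max(0, L-3) per run.
import Mathlib
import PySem

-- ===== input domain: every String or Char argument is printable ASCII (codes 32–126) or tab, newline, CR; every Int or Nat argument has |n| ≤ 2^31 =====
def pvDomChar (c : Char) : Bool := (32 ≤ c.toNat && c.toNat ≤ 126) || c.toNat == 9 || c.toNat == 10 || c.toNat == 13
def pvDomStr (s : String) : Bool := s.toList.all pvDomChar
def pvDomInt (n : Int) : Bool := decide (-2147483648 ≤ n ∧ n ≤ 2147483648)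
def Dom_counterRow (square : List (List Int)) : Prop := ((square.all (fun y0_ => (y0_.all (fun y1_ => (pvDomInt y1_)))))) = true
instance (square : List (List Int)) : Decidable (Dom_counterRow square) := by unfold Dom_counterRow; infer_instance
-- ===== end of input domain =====

-- B replaces A's per-cell sliding counter by grouping each row into maximal runs of
-- consecutive 1s and adding the closed form max(0, L-3) per run (objective: alternative).

-- ===== PORT A =====
-- per-cell step of A: update the reset counter, then bump rows when count >= 4
def counterRowStep (st : Int × Int) (cube : Int) : Int × Int :=
  let count := if cube == 1 then st.1 + 1 else 0
  let rows := if count ≥ 4 then st.2 + 1 else st.2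
  (count, rows)

def counterRow (square : List (List Int)) : Int :=
  square.foldl (fun rows row => (row.foldl counterRowStep (0, rows)).2) 0

-- ===== PORT B =====
-- lengths of the maximal runs of consecutive 1s (groupby with key cube == 1; the
-- accumulator c is the length of the current run of 1s, emitted when it ends)
def oneRuns (row : List Int) (c : Int) : List Int :=
  match row with
  | [] => [c]
  | x :: xs => if x == 1 then oneRuns xs (c + 1) else c :: oneRuns xs 0

def counterRow_alt (square : List (List Int)) : Int :=
  square.foldl (fun total row =>
    (oneRuns row 0).foldl (fun t L => t + max 0 (L - 3)) total) 0

-- ===== PRECONDITION & SPEC =====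
def Spec_counterRow (square : List (List Int)) (out : Int) : Prop := out = counterRow_alt square
instance (square : List (List Int)) (out : Int) : Decidable (Spec_counterRow square out) := by unfold Spec_counterRow; infer_instance

-- ===== CLAIM (what is proved, stated in full; the proofs are below) =====
def Claim_equal_counterRow : Prop := ∀ (square : List (List Int)), Dom_counterRow square → Spec_counterRow square (counterRow square)

-- ===== LEMMAS AND PROOFS =====

theorem foldl_max_shift (xs : List Int) (s t : Int) :
    xs.foldl (fun t L => t + max 0 (L - 3)) (s + t) =
      s + xs.foldl (fun t L => t + max 0 (L - 3)) t := by
  induction xs generalizing t with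
  | nil => rfl
  | cons x xs ih =>
    simp only [List.foldl_cons]
    rw [add_assoc, ih]

theorem row_invariant (row : List Int) (c r : Int) :
    (row.foldl counterRowStep (c, r)).2 =
      r - max 0 (c - 3) + (oneRuns row c).foldl (fun t L => t + max 0 (L - 3)) 0 := by
  induction row generalizing c r with
  | nil => simp [oneRuns]
  | cons x xs ih =>
    simp only [List.foldl_cons, counterRowStep, oneRuns]
    by_cases hx : x == 1
    · simp only [hx, if_pos]
      rw [ih]
      have : (if c + 1 ≥ 4 then r + 1 else r) = r + (max 0 (c + 1 - 3) - max 0 (c - 3)) := by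
        split_ifs with h <;> omega
      rw [this]; ring_nf
    · simp only [hx, if_neg, Bool.false_eq_true, not_false_iff]
      have h0 : ¬ ((0 : Int) ≥ 4) := by omega
      rw [if_neg h0, ih]
      simp only [List.foldl_cons]
      have : (0 : Int) + max 0 (c - 3) = max 0 (c - 3) + 0 := by ring
      rw [this, foldl_max_shift]
      omega

theorem outer_invariant (square : List (List Int)) (acc : Int) :
    square.foldl (fun rows row => (row.foldl counterRowStep (0, rows)).2) acc =
      square.foldl (fun total row =>
        (oneRuns row 0).foldl (fun t L => t + max 0 (L - 3)) total) acc := by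
  induction square generalizing acc with
  | nil => rfl
  | cons row rest ih =>
    simp only [List.foldl_cons]
    rw [row_invariant, ih]
    congr 1
    have : acc = acc + 0 := by ring
    rw [this, foldl_max_shift]
    simp

-- ===== VERDICT (by name: the statement is the Claim_ definition above) =====
theorem counterRow_spec : Claim_equal_counterRow := by
  intro square _
  unfold Spec_counterRow counterRow counterRow_alt
  exact outer_invariant square 0
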